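-- pv_equiv track=rewrite | github.com/baxtiyorovbekzod/Python-List-Dict | task19.py | get_products_in_price_range
-- ===== SOURCE A (Python) =====
-- def get_products_in_price_range(products):
--     min_price=products[0]
--     max_price=products[0]
--     for product in products:
--         if product["price"] < min_price["price"]:
--             min_price = product
--         if product["price"] > max_price["price"]:
--             max_price = product
--
--     return min_price, max_price
-- ===== SOURCE B (Python) =====
-- def get_products_in_price_range(products):
--     by_price_asc = sorted(products, key=lambda p: p["price"])
--     by_price_desc = sorted(products, key=lambda p: p["price"], reverse=True)
--     return by_price_asc[0], by_price_desc[0]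
-- ===== Notes on version B (the rewrite author's own statement) =====
-- stated objective: alternative
-- what changed: Replaces the fused running-min/running-max linear scan with two stable sorts by price (ascending and descending) and takes the head of each; stability makes each head the first element attaining the extreme price, matching A's earliest-tie rule.
import Mathlib
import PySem

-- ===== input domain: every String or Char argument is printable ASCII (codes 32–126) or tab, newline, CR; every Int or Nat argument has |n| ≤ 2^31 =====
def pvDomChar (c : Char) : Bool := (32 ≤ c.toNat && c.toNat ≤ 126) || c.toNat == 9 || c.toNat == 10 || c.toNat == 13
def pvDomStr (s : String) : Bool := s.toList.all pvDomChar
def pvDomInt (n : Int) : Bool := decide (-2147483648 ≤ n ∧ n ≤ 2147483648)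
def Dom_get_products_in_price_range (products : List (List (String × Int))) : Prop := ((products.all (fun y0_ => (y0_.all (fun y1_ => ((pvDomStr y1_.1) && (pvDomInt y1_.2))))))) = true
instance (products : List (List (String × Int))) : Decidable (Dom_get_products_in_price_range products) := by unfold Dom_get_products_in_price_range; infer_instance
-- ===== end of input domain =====

-- B replaces A's fused running-min/max scan by two stable sorts on the price
-- (ascending and descending), returning the head of each; stability gives the
-- first extreme element, matching A's earliest-tie rule. O(n log n) vs A's O(n).


-- product["price"]: first-match association-list lookup (Pre_ guarantees the key is present)
def pvPrice (p : List (String × Int)) : Int := ((PySem.Dict.mk p).get? "price").getD 0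

-- ===== PORT A =====
def get_products_in_price_range (products : List (List (String × Int))) : (List (String × Int)) × (List (String × Int)) :=
  match products with
  | [] => ([], [])   -- Python raises IndexError here; excluded by Pre_
  | p0 :: _ =>
    products.foldl
      (fun st product =>
        let st1 := if pvPrice product < pvPrice st.1 then (product, st.2) else st
        if pvPrice product > pvPrice st1.2 then (st1.1, product) else st1)
      (p0, p0)

-- ===== PORT B =====
def get_products_in_price_range_alt (products : List (List (String × Int))) : (List (String × Int)) × (List (String × Int)) :=
  let by_price_asc := PySem.List.sorted products pvPrice
  let by_price_desc := PySem.List.sorted products pvPrice true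
  match by_price_asc, by_price_desc with
  | m :: _, M :: _ => (m, M)
  | _, _ => ([], [])   -- [0] on an empty sort raises IndexError in Python; excluded by Pre_

-- ===== PRECONDITION & SPEC =====
-- Pre_ excludes exactly the inputs where the Python A raises: the empty list
-- (IndexError on products[0]) and products lacking a "price" key (KeyError).
def Pre_get_products_in_price_range (products : List (List (String × Int))) : Prop :=
  products ≠ [] ∧ ∀ p ∈ products, ((PySem.Dict.mk p).get? "price").isSome
instance (products : List (List (String × Int))) : Decidable (Pre_get_products_in_price_range products) := by unfold Pre_get_products_in_price_range; infer_instance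
def pvWitness_get_products_in_price_range : (List (List (String × Int))) :=
  [[("name", 1), ("price", 5)], [("price", 2)], [("price", 9)]]
def Spec_get_products_in_price_range (products : List (List (String × Int))) (out : (List (String × Int)) × (List (String × Int))) : Prop := out = get_products_in_price_range_alt products
instance (products : List (List (String × Int))) (out : (List (String × Int)) × (List (String × Int))) : Decidable (Spec_get_products_in_price_range products out) := by unfold Spec_get_products_in_price_range; infer_instance

-- ===== CLAIM =====
def Claim_equal_get_products_in_price_range : Prop := ∀ (products : List (List (String × Int))), Dom_get_products_in_price_range products → Pre_get_products_in_price_range products → Spec_get_products_in_price_range products (get_products_in_price_range products)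

-- ===== LEMMAS AND PROOFS =====

-- A's fused fold is the pair of the two independent first-extremum folds.
theorem pv_fold_pair (t : List (List (String × Int))) (a b : List (String × Int)) :
    t.foldl
      (fun st product =>
        let st1 := if pvPrice product < pvPrice st.1 then (product, st.2) else st
        if pvPrice product > pvPrice st1.2 then (st1.1, product) else st1)
      (a, b)
    = (t.foldl (fun m y => if pvPrice y < pvPrice m then y else m) a,
       t.foldl (fun m y => if pvPrice m < pvPrice y then y else m) b) := by
  induction t generalizing a b with
  | nil => rfl
  | cons x t ih =>
      simp only [List.foldl_cons]
      rw [← ih]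
      by_cases h1 : pvPrice x < pvPrice a <;> by_cases h2 : pvPrice b < pvPrice x <;>
        simp [h1, h2, gt_iff_lt]

-- the head of the insertion-sort fold evolves as the first-extremum update
theorem pv_head_foldl_insertBy {α : Type} (before : α → α → Bool)
    (t : List α) (h : α) (rest : List α) :
    t.foldl (fun acc x => PySem.List.insertBy before x acc) (h :: rest)
    = (t.foldl (fun m x => if before x m then x else m) h)
        :: (t.foldl (fun acc x => PySem.List.insertBy before x acc) (h :: rest)).tail := by
  induction t generalizing h rest with
  | nil => rfl
  | cons x t ih =>
      simp only [List.foldl_cons, PySem.List.insertBy]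
      by_cases hb : before x h = true <;> simp only [hb, if_true, if_false, Bool.false_eq_true]
      · exact ih x (h :: rest)
      · exact ih h (PySem.List.insertBy before x rest)

-- head of the stable ascending sort = A's running-first-min loop
theorem pv_sorted_head (p0 : List (String × Int)) (t : List (List (String × Int))) :
    PySem.List.sorted (p0 :: t) pvPrice
    = (t.foldl (fun m y => if pvPrice y < pvPrice m then y else m) p0)
        :: (PySem.List.sorted (p0 :: t) pvPrice).tail := by
  rw [PySem.List.sorted_eq_foldl_insertBy]
  simp only [List.foldl_cons, PySem.List.insertBy]
  have := pv_head_foldl_insertBy (fun a b : List (String × Int) => decide (pvPrice a < pvPrice b)) t p0 []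
  simpa using this

-- head of the stable descending sort = A's running-first-max loop
theorem pv_sorted_rev_head (p0 : List (String × Int)) (t : List (List (String × Int))) :
    PySem.List.sorted (p0 :: t) pvPrice true
    = (t.foldl (fun m y => if pvPrice m < pvPrice y then y else m) p0)
        :: (PySem.List.sorted (p0 :: t) pvPrice true).tail := by
  rw [PySem.List.sorted_rev_eq_foldl_insertBy]
  simp only [List.foldl_cons, PySem.List.insertBy]
  have := pv_head_foldl_insertBy (fun a b : List (String × Int) => decide (pvPrice b < pvPrice a)) t p0 []
  simpa using this

-- ===== VERDICT =====
theorem get_products_in_price_range_spec : Claim_equal_get_products_in_price_range := by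
  intro products _hdom hpre
  obtain ⟨hne, _⟩ := hpre
  match products with
  | [] => exact absurd rfl hne
  | p0 :: t =>
      show get_products_in_price_range (p0 :: t) = get_products_in_price_range_alt (p0 :: t)
      unfold get_products_in_price_range get_products_in_price_range_alt
      simp only [List.foldl_cons, lt_self_iff_false, if_false, gt_iff_lt]
      rw [pv_fold_pair]
      rw [pv_sorted_head p0 t, pv_sorted_rev_head p0 t]
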